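-- pv_equiv track=rewrite | github.com/jjw3300/codingcoding | Semtember/0910/binary/5207.py | binary_search_changed
-- ===== SOURCE A (Python) =====
-- def binary_search_changed(arr, target):
--     left, right = 0, len(arr) - 1
--     before_dire = None
--
--     while left <= right:
--         mid = (left + right) // 2
--         if arr[mid] == target:
--             return True
--         elif target < arr[mid]:
--             if before_dire == 'L':
--                 return False
--             before_dire = 'L'
--             right = mid - 1
--         else:
--             if before_dire == 'R':
--                 return False
--             before_dire = 'R'
--             left = mid + 1
--
--     return False
-- ===== SOURCE B (Python) =====
-- def binary_search_changed(arr, target):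
--     # direction flag eliminated: two mutually recursive states, one per last direction
--     def after_L(l, r):  # previous step went left; another left move fails
--         if l > r:
--             return False
--         m = (l + r) // 2
--         if arr[m] == target:
--             return True
--         if target < arr[m]:
--             return False
--         return after_R(m + 1, r)
--
--     def after_R(l, r):  # previous step went right; another right move fails
--         if l > r:
--             return False
--         m = (l + r) // 2
--         if arr[m] == target:
--             return True
--         if target < arr[m]:
--             return after_L(l, m - 1)
--         return False
--
--     l, r = 0, len(arr) - 1
--     if l > r:
--         return False
--     m = (l + r) // 2
--     if arr[m] == target:
--         return True
--     if target < arr[m]: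
--         return after_L(l, m - 1)
--     return after_R(m + 1, r)
-- ===== Notes on version B (the rewrite author's own statement) =====
-- stated objective: alternative
-- what changed: The loop threading a before_dire flag is replaced by two mutually recursive helpers (after_L/after_R), one per last move direction, so the flag becomes control flow and the repeated-direction check becomes an immediate return in the matching state.
import Mathlib
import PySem

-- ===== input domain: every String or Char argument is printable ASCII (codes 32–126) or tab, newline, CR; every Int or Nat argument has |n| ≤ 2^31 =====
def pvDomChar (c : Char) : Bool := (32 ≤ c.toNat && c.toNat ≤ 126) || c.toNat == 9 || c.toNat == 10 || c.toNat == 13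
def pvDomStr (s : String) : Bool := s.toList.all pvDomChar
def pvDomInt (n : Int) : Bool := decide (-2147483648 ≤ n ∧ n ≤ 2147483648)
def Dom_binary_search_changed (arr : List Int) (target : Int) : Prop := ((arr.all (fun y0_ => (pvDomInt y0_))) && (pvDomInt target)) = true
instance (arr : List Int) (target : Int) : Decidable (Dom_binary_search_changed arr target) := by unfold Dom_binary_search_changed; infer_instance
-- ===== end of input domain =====

-- B replaces A's flag-threading loop by two mutually recursive direction states; same cost, different decomposition.

-- ===== PORT A =====
-- A's while-loop, step for step; before : none / some "L" / some "R" mirrors before_dire.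
-- fuel is a totality guard only: the interval shrinks every iteration, so arr.length + 1 steps always suffice.
-- arr[mid] is rendered with pyGet? … |>.getD 0: whenever the loop tests the element, 0 ≤ left ≤ mid ≤ right < arr.length, so the index is in range and no default is ever taken.
def bsLoopA (arr : List Int) (target : Int) : Nat → Int → Int → Option String → Bool
  | 0, _, _, _ => false
  | fuel + 1, left, right, before =>
    if left ≤ right then
      let mid := PySem.Int.floordiv (left + right) 2
      let v := (PySem.List.pyGet? arr mid).getD 0
      if v = target then true
      else if target < v then
        if before = some "L" then false
        else bsLoopA arr target fuel left (mid - 1) (some "L")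
      else
        if before = some "R" then false
        else bsLoopA arr target fuel (mid + 1) right (some "R")
    else false

def binary_search_changed (arr : List Int) (target : Int) : Bool :=
  bsLoopA arr target (arr.length + 1) 0 ((arr.length : Int) - 1) none

-- ===== PORT B =====
-- Source B's two mutually recursive helpers (the flag is control flow); same fuel guard as A's port.
mutual
def bsAfterL (arr : List Int) (target : Int) : Nat → Int → Int → Bool
  | 0, _, _ => false
  | fuel + 1, l, r =>
    if l > r then false
    else
      let m := PySem.Int.floordiv (l + r) 2
      let v := (PySem.List.pyGet? arr m).getD 0
      if v = target then true
      else if target < v then false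
      else bsAfterR arr target fuel (m + 1) r

def bsAfterR (arr : List Int) (target : Int) : Nat → Int → Int → Bool
  | 0, _, _ => false
  | fuel + 1, l, r =>
    if l > r then false
    else
      let m := PySem.Int.floordiv (l + r) 2
      let v := (PySem.List.pyGet? arr m).getD 0
      if v = target then true
      else if target < v then bsAfterL arr target fuel l (m - 1)
      else false
end

def binary_search_changed_alt (arr : List Int) (target : Int) : Bool :=
  let l : Int := 0
  let r : Int := (arr.length : Int) - 1
  if l > r then false
  else
    let m := PySem.Int.floordiv (l + r) 2
    let v := (PySem.List.pyGet? arr m).getD 0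
    if v = target then true
    else if target < v then bsAfterL arr target arr.length l (m - 1)
    else bsAfterR arr target arr.length (m + 1) r

-- ===== PRECONDITION & SPEC =====
def Spec_binary_search_changed (arr : List Int) (target : Int) (out : Bool) : Prop := out = binary_search_changed_alt arr target
instance (arr : List Int) (target : Int) (out : Bool) : Decidable (Spec_binary_search_changed arr target out) := by unfold Spec_binary_search_changed; infer_instance

-- ===== CLAIM (what is proved, stated in full; the proofs are below) =====
def Claim_equal_binary_search_changed : Prop := ∀ (arr : List Int) (target : Int), Dom_binary_search_changed arr target → Spec_binary_search_changed arr target (binary_search_changed arr target)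

-- ===== LEMMAS AND PROOFS =====

-- the entry-point body of B, generalized over the interval (proof helper only)
def bsStart (arr : List Int) (target : Int) (fuel : Nat) (l r : Int) : Bool :=
  if l > r then false
  else
    let m := PySem.Int.floordiv (l + r) 2
    let v := (PySem.List.pyGet? arr m).getD 0
    if v = target then true
    else if target < v then bsAfterL arr target fuel l (m - 1)
    else bsAfterR arr target fuel (m + 1) r

-- A's loop in each flag state coincides with B's corresponding recursive state whenever both
-- fuels dominate the interval size; induction on A's fuel.
lemma bsLoop_eq_states (arr : List Int) (target : Int) :
    ∀ (fa fb : Nat) (l r : Int), (r - l + 1).toNat < fa → (r - l + 1).toNat < fb →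
      (bsLoopA arr target fa l r (some "L") = bsAfterL arr target fb l r ∧
       bsLoopA arr target fa l r (some "R") = bsAfterR arr target fb l r) := by
  intro fa
  induction fa with
  | zero => intro fb l r ha hb; omega
  | succ fa ih =>
    intro fb l r ha hb
    obtain ⟨fb, rfl⟩ : ∃ k, fb = k + 1 := ⟨fb - 1, by omega⟩
    by_cases hlr : l ≤ r
    · have hmid := PySem.Int.floordiv_two_mid_bounds hlr
      constructor
      · rw [bsLoopA, bsAfterL]
        set m := PySem.Int.floordiv (l + r) 2 with hm
        by_cases h1 : (PySem.List.pyGet? arr m).getD 0 = target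
        · simp [hlr, show ¬ l > r by omega, h1]
        · by_cases h2 : target < (PySem.List.pyGet? arr m).getD 0
          · simp [hlr, show ¬ l > r by omega, h1, h2]
          · have hrec := (ih fb (m + 1) r (by omega) (by omega)).2
            simp [hlr, show ¬ l > r by omega, h1, h2, hrec]
      · rw [bsLoopA, bsAfterR]
        set m := PySem.Int.floordiv (l + r) 2 with hm
        by_cases h1 : (PySem.List.pyGet? arr m).getD 0 = target
        · simp [hlr, show ¬ l > r by omega, h1]
        · by_cases h2 : target < (PySem.List.pyGet? arr m).getD 0
          · have hrec := (ih fb l (m - 1) (by omega) (by omega)).1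
            simp [hlr, show ¬ l > r by omega, h1, h2, hrec]
          · simp [hlr, show ¬ l > r by omega, h1, h2]
    · constructor
      · rw [bsLoopA, bsAfterL]; simp [hlr, show l > r by omega]
      · rw [bsLoopA, bsAfterR]; simp [hlr, show l > r by omega]

-- A's loop in the initial (no-flag) state coincides with B's entry body.
lemma bsLoop_eq_start (arr : List Int) (target : Int) (fa fb : Nat) (l r : Int)
    (ha : (r - l + 1).toNat < fa) (hb : (r - l + 1).toNat ≤ fb) :
    bsLoopA arr target fa l r none = bsStart arr target fb l r := by
  obtain ⟨fa, rfl⟩ : ∃ k, fa = k + 1 := ⟨fa - 1, by omega⟩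
  by_cases hlr : l ≤ r
  · have hmid := PySem.Int.floordiv_two_mid_bounds hlr
    rw [bsLoopA, bsStart]
    set m := PySem.Int.floordiv (l + r) 2 with hm
    by_cases h1 : (PySem.List.pyGet? arr m).getD 0 = target
    · simp [hlr, show ¬ l > r by omega, h1]
    · by_cases h2 : target < (PySem.List.pyGet? arr m).getD 0
      · have hrec := (bsLoop_eq_states arr target fa fb l (m - 1) (by omega) (by omega)).1
        simp [hlr, show ¬ l > r by omega, h1, h2, hrec]
      · have hrec := (bsLoop_eq_states arr target fa fb (m + 1) r (by omega) (by omega)).2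
        simp [hlr, show ¬ l > r by omega, h1, h2, hrec]
  · rw [bsLoopA, bsStart]; simp [hlr, show l > r by omega]

-- ===== VERDICT (by name: the statement is the Claim_ definition above) =====
theorem binary_search_changed_spec : Claim_equal_binary_search_changed := by
  intro arr target _
  unfold Spec_binary_search_changed binary_search_changed
  have halt : binary_search_changed_alt arr target = bsStart arr target arr.length 0 ((arr.length : Int) - 1) := rfl
  rw [halt]
  exact bsLoop_eq_start arr target (arr.length + 1) arr.length 0 ((arr.length : Int) - 1) (by omega) (by omega)
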